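-- pv_equiv track=rewrite | github.com/sharma-anubhav/CrackingTheCodingInterview-DSA | ch27(2PT)/27.5.py | reversematchcase
-- ===== SOURCE A (Python) =====
-- def reversematchcase(s):
--     l, r = 0, len(s)-1
--     while l < len(s) and r >=0:
--         if not s[l].islower():
--             l+=1
--         elif not s[r].isupper():
--             r-=1
--         else:
--             if s[l] != s[r].lower():
--                 return False
--             l+=1
--             r-=1
--     return True
-- ===== SOURCE B (Python) =====
-- def reversematchcase(s):
--     lowers = [c for c in s if c.islower()]
--     uppers = [c for c in s if c.isupper()]
--     for lo, up in zip(lowers, reversed(uppers)):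
--         if lo != up.lower():
--             return False
--     return True
-- ===== Notes on version B (the rewrite author's own statement) =====
-- stated objective: simpler
-- what changed: Replaces the interleaved two-pointer index scan with two filtered lists (lowercase letters in order, uppercase letters reversed) compared element-wise with zip.
import Mathlib
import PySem

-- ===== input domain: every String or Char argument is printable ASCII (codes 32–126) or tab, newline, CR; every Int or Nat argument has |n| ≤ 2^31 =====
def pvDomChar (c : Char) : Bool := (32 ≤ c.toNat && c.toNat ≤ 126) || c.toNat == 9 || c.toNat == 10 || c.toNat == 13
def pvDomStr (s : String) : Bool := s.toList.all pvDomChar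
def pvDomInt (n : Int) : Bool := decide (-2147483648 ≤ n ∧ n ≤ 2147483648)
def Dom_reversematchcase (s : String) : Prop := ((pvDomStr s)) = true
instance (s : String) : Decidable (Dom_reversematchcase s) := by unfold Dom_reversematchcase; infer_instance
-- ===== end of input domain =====

-- B replaces A's interleaved two-pointer index scan by two filtered lists
-- (lowercase forward, uppercase reversed) compared element-wise: simpler decomposition.


-- ===== PORT A =====
-- the while loop; r is encoded as r1 = r + 1 : Nat (r1 = 0 ↔ Python r = -1),
-- so the loop guard 'l < len(s) and r >= 0' is 'l < cs.length ∧ 0 < r1'.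
def reversematchcaseLoop (cs : List Char) (l r1 : Nat) : Bool :=
  if l < cs.length ∧ 0 < r1 then
    if ¬ (PySem.Chars.islower (cs.getD l ' ')) then
      reversematchcaseLoop cs (l + 1) r1
    else if ¬ (PySem.Chars.isupper (cs.getD (r1 - 1) ' ')) then
      reversematchcaseLoop cs l (r1 - 1)
    else
      if cs.getD l ' ' ≠ PySem.Chars.lowerChar (cs.getD (r1 - 1) ' ') then
        false
      else
        reversematchcaseLoop cs (l + 1) (r1 - 1)
  else
    true
termination_by (cs.length - l) + r1
decreasing_by all_goals omega

def reversematchcase (s : String) : Bool :=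
  reversematchcaseLoop s.toList 0 s.toList.length

-- ===== PORT B =====
-- element-wise comparison of zip(lowers, reversed(uppers)) (zip truncates)
def reversematchcaseZip : List Char → List Char → Bool
  | lo :: ls, up :: us =>
      if lo ≠ PySem.Chars.lowerChar up then false else reversematchcaseZip ls us
  | _, _ => true

def reversematchcase_alt (s : String) : Bool :=
  reversematchcaseZip (s.toList.filter PySem.Chars.islower)
    ((s.toList.filter PySem.Chars.isupper).reverse)

-- ===== PRECONDITION & SPEC =====
def Spec_reversematchcase (s : String) (out : Bool) : Prop := out = reversematchcase_alt s
instance (s : String) (out : Bool) : Decidable (Spec_reversematchcase s out) := by unfold Spec_reversematchcase; infer_instance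

-- ===== CLAIM (what is proved, stated in full; the proofs are below) =====
def Claim_equal_reversematchcase : Prop := ∀ (s : String), Dom_reversematchcase s → Spec_reversematchcase s (reversematchcase s)

-- ===== LEMMAS AND PROOFS =====

-- loop invariant: A's loop at (l, r1) computes B's comparison of the
-- lowercase letters of the suffix from l against the reversed uppercase letters
-- of the prefix of length r1.
theorem reversematchcaseLoop_eq (cs : List Char) (l r1 : Nat) (hr : r1 ≤ cs.length) :
    reversematchcaseLoop cs l r1 =
      reversematchcaseZip ((cs.drop l).filter PySem.Chars.islower)
        (((cs.take r1).filter PySem.Chars.isupper).reverse) := by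
  induction l, r1 using reversematchcaseLoop.induct cs with
  | case1 l r1 hg hlo ih =>
    rw [reversematchcaseLoop]
    simp only [if_pos hg, if_pos hlo]
    rw [ih hr]
    obtain ⟨hl, _⟩ := hg
    have hgl : cs.getD l ' ' = cs[l] := List.getD_eq_getElem cs ' ' hl
    rw [List.drop_eq_getElem_cons hl, List.filter_cons, if_neg (by rw [← hgl]; exact hlo)]
  | case2 l r1 hg hlo hup ih =>
    rw [reversematchcaseLoop]
    simp only [if_pos hg, if_neg hlo, if_pos hup]
    rw [ih (by omega)]
    obtain ⟨_, hr1⟩ := hg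
    have hlt : r1 - 1 < cs.length := by omega
    have hgr : cs.getD (r1 - 1) ' ' = cs[r1 - 1] := List.getD_eq_getElem cs ' ' hlt
    have htake : cs.take r1 = cs.take (r1 - 1) ++ [cs[r1 - 1]] := by
      conv_lhs => rw [show r1 = (r1 - 1) + 1 by omega]
      rw [List.take_add_one]
      simp [List.getElem?_eq_getElem hlt]
    rw [htake, List.filter_append, List.filter_cons, if_neg (by rw [← hgr]; exact hup)]
    simp
  | case3 l r1 hg hlo hup hne =>
    rw [reversematchcaseLoop]
    simp only [if_pos hg, if_neg hlo, if_neg hup, if_pos hne]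
    obtain ⟨hl, hr1⟩ := hg
    have hlt : r1 - 1 < cs.length := by omega
    have hgl : cs.getD l ' ' = cs[l] := List.getD_eq_getElem cs ' ' hl
    have hgr : cs.getD (r1 - 1) ' ' = cs[r1 - 1] := List.getD_eq_getElem cs ' ' hlt
    have htake : cs.take r1 = cs.take (r1 - 1) ++ [cs[r1 - 1]] := by
      conv_lhs => rw [show r1 = (r1 - 1) + 1 by omega]
      rw [List.take_add_one]
      simp [List.getElem?_eq_getElem hlt]
    rw [List.drop_eq_getElem_cons hl, htake, List.filter_cons,
      if_pos (by rw [← hgl]; exact not_not.mp hlo),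
      List.filter_append, List.filter_cons, if_pos (by rw [← hgr]; exact not_not.mp hup)]
    simp only [List.filter_nil, List.reverse_append, List.reverse_cons, List.reverse_nil,
      List.nil_append, List.cons_append, reversematchcaseZip]
    rw [if_pos (by rw [← hgl, ← hgr]; exact hne)]
  | case4 l r1 hg hlo hup hne ih =>
    rw [reversematchcaseLoop]
    simp only [if_pos hg, if_neg hlo, if_neg hup, if_neg hne]
    rw [ih (by omega)]
    obtain ⟨hl, hr1⟩ := hg
    have hlt : r1 - 1 < cs.length := by omega
    have hgl : cs.getD l ' ' = cs[l] := List.getD_eq_getElem cs ' ' hl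
    have hgr : cs.getD (r1 - 1) ' ' = cs[r1 - 1] := List.getD_eq_getElem cs ' ' hlt
    have htake : cs.take r1 = cs.take (r1 - 1) ++ [cs[r1 - 1]] := by
      conv_lhs => rw [show r1 = (r1 - 1) + 1 by omega]
      rw [List.take_add_one]
      simp [List.getElem?_eq_getElem hlt]
    rw [List.drop_eq_getElem_cons hl, htake, List.filter_cons,
      if_pos (by rw [← hgl]; exact not_not.mp hlo),
      List.filter_append, List.filter_cons, if_pos (by rw [← hgr]; exact not_not.mp hup)]
    simp only [List.filter_nil, List.reverse_append, List.reverse_cons, List.reverse_nil,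
      List.nil_append, List.cons_append, reversematchcaseZip]
    rw [if_neg (by rw [← hgl, ← hgr]; exact hne)]
  | case5 l r1 hg =>
    rw [reversematchcaseLoop, if_neg hg]
    rcases Nat.lt_or_ge l cs.length with hl | hl
    · have hr1 : r1 = 0 := by omega
      subst hr1
      simp only [List.take_zero, List.filter_nil, List.reverse_nil]
      cases (cs.drop l).filter PySem.Chars.islower <;> rfl
    · rw [List.drop_eq_nil_of_le hl]
      rfl

-- ===== VERDICT (by name: the statement is the Claim_ definition above) =====
theorem reversematchcase_spec : Claim_equal_reversematchcase := by
  intro s _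
  unfold Spec_reversematchcase reversematchcase reversematchcase_alt
  rw [reversematchcaseLoop_eq _ _ _ (le_refl _), List.drop_zero, List.take_length]
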